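-- pv_equiv track=rewrite | github.com/fabiog1901/cp | cp/workers/clusters/backup_catalog.py | _summarize_backup_type
-- ===== SOURCE A (Python) =====
-- def _summarize_backup_type(backup_types: list[str]) -> str | None:
--     normalized = {backup_type.lower() for backup_type in backup_types}
--     if not normalized:
--         return None
--     if "incremental" in normalized:
--         return "incremental"
--     if "full" in normalized:
--         return "full"
--     return sorted(normalized)[0]
-- ===== SOURCE B (Python) =====
-- def _summarize_backup_type(backup_types: list[str]) -> str | None:
--     saw_any = False
--     has_incremental = False
--     has_full = False
--     best = None
--     for bt in backup_types:
--         low = bt.lower()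
--         saw_any = True
--         if low == "incremental":
--             has_incremental = True
--         elif low == "full":
--             has_full = True
--         if best is None or low < best:
--             best = low
--     if not saw_any:
--         return None
--     if has_incremental:
--         return "incremental"
--     if has_full:
--         return "full"
--     return best
-- ===== Notes on version B (the rewrite author's own statement) =====
-- stated objective: alternative
-- what changed: Replaces the set comprehension + membership tests + full sort with a single linear pass that keeps two flags and a running lexicographic minimum of the lowercased names.
import Mathlib
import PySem

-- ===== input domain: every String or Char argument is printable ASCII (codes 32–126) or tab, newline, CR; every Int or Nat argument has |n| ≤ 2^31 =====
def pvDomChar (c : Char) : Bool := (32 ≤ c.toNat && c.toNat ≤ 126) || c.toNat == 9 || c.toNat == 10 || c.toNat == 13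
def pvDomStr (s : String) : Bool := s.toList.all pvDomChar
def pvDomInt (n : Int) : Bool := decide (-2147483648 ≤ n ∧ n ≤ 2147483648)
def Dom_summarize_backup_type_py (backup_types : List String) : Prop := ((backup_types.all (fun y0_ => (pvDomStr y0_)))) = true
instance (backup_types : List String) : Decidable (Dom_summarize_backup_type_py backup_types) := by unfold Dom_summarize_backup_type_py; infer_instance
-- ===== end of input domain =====

-- B replaces A's set-build + membership tests + sort with one linear pass keeping two flags and a running lexicographic minimum (alternative decomposition, same results).

-- ===== PORT A =====
def summarize_backup_type_py (backup_types : List String) : Option String :=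
  let normalized : PySem.Set String :=
    PySem.Set.ofList (backup_types.map (fun backup_type => PySem.Str.lower backup_type))
  if normalized.isEmpty then none
  else if PySem.Set.contains normalized "incremental" then some "incremental"
  else if PySem.Set.contains normalized "full" then some "full"
  else PySem.List.pyGet? (PySem.List.sorted normalized (fun x => x) false) 0

-- ===== PORT B =====
def pvStepB (acc : Bool × Bool × Bool × Option String) (bt : String) :
    Bool × Bool × Bool × Option String :=
  let low := PySem.Str.lower bt
  ( true,
    acc.2.1 || (low == "incremental"),
    (if low == "incremental" then acc.2.2.1
     else if low == "full" then true
     else acc.2.2.1),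
    (match acc.2.2.2 with
     | none => some low
     | some b => if low < b then some low else some b) )

def summarize_backup_type_py_alt (backup_types : List String) : Option String :=
  let st := backup_types.foldl pvStepB (false, false, false, none)
  if !st.1 then none
  else if st.2.1 then some "incremental"
  else if st.2.2.1 then some "full"
  else st.2.2.2

-- ===== PRECONDITION & SPEC =====
def Spec_summarize_backup_type_py (backup_types : List String) (out : Option String) : Prop := out = summarize_backup_type_py_alt backup_types
instance (backup_types : List String) (out : Option String) : Decidable (Spec_summarize_backup_type_py backup_types out) := by unfold Spec_summarize_backup_type_py; infer_instance

-- ===== CLAIM (what is proved, stated in full; the proofs are below) =====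
def Claim_equal_summarize_backup_type_py : Prop := ∀ (backup_types : List String), Dom_summarize_backup_type_py backup_types → Spec_summarize_backup_type_py backup_types (summarize_backup_type_py backup_types)

-- ===== LEMMAS AND PROOFS =====

-- running-minimum accumulator of B, expressed over the already-lowered list
def pvMinAcc (m : Option String) (l : List String) : Option String :=
  l.foldl (fun o x => match o with
    | none => some x
    | some b => if x < b then some x else some b) m

-- B's third flag as a function of the current lowered element
theorem pvFullFlag (low : String) (c : Bool) :
    (if low == "incremental" then c else if low == "full" then true else c)
      = (c || (low == "full")) := by
  by_cases h1 : low = "incremental"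
  · subst h1; simp
  · by_cases h2 : low = "full"
    · subst h2; simp
    · simp [h1, h2]

-- the fold of B computes: non-emptiness, the two membership flags, and the running minimum
theorem pvFoldB_char (l : List String) (a b c : Bool) (m : Option String) :
    l.foldl pvStepB (a, b, c, m) =
      ( a || !l.isEmpty,
        b || (l.map (fun s => PySem.Str.lower s)).contains "incremental",
        c || (l.map (fun s => PySem.Str.lower s)).contains "full",
        pvMinAcc m (l.map (fun s => PySem.Str.lower s)) ) := by
  induction l generalizing a b c m with
  | nil => simp [pvMinAcc]
  | cons x t ih =>
    simp only [List.foldl_cons, pvStepB]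
    rw [ih, pvFullFlag]
    simp only [List.map_cons, List.isEmpty_cons, List.contains_cons, Prod.mk.injEq]
    refine ⟨by simp, by simp [Bool.or_assoc, BEq.comm], by simp [Bool.or_assoc, BEq.comm], ?_⟩
    simp only [pvMinAcc, List.foldl_cons]

theorem pvRunMin (t : List String) : ∀ x : String,
    t.foldl (fun o y => match o with
      | none => some y
      | some b => if y < b then some y else some b) (some x)
      = some (t.foldl min x) := by
  induction t with
  | nil => intro x; rfl
  | cons y t ih =>
    intro x
    simp only [List.foldl_cons]
    show t.foldl _ (if y < x then some y else some x) = some (t.foldl min (min x y))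
    by_cases h : y < x
    · rw [if_pos h, ih, min_eq_right h.le]
    · rw [if_neg h, ih, min_eq_left (le_of_not_gt h)]

theorem pvMinAcc_cons (x : String) (t : List String) :
    pvMinAcc none (x :: t) = some (t.foldl min x) := by
  unfold pvMinAcc
  simp only [List.foldl_cons]
  exact pvRunMin t x

-- head of sorted(set(x :: t)) is the running minimum of x :: t
theorem pvSortedHead (x : String) (t : List String) :
    PySem.List.pyGet? (PySem.List.sorted (PySem.Set.ofList (x :: t)) (fun y => y) false) 0
      = some (t.foldl min x) := by
  have hperm : (PySem.List.sorted (PySem.Set.ofList (x :: t)) (fun y : String => y) false).Perm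
      (PySem.Set.ofList (x :: t)) := PySem.List.sorted_perm _ _ _
  have hne : PySem.List.sorted (PySem.Set.ofList (x :: t)) (fun y : String => y) false ≠ [] := by
    intro h
    rw [PySem.List.sorted_eq_nil_iff] at h
    have hx : x ∈ PySem.Set.ofList (x :: t) :=
      (PySem.Set.mem_ofList _ _).mpr List.mem_cons_self
    simp [h] at hx
  obtain ⟨m, rest, hs⟩ := List.exists_cons_of_ne_nil hne
  have hmemm : m ∈ (x :: t) := by
    refine (PySem.Set.mem_ofList _ _).mp (hperm.mem_iff.mp ?_)
    simp [hs]
  have hmin : ∀ y ∈ (x :: t), m ≤ y := by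
    intro y hy
    exact PySem.List.key_head_sorted_le _ _ hs y ((PySem.Set.mem_ofList _ _).mpr hy)
  have hf1 := PySem.List.foldl_min_le t x
  have hf2 : t.foldl min x = x ∨ t.foldl min x ∈ t := PySem.List.foldl_min_mem t x
  have heq : m = t.foldl min x := by
    apply le_antisymm
    · rcases hf2 with h | h
      · rw [h]; exact hmin x List.mem_cons_self
      · exact hmin _ (List.mem_cons_of_mem _ h)
    · rcases List.mem_cons.mp hmemm with h | h
      · rw [h]; exact hf1.1
      · exact hf1.2 m h
  rw [hs, heq]
  simp [PySem.List.pyGet?, PySem.List.pyIdx?]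

theorem pvContains_ofList (L : List String) (v : String) :
    PySem.Set.contains (PySem.Set.ofList L) v = L.contains v := by
  rw [PySem.Set.contains_eq_listContains]
  by_cases hv : v ∈ L
  · simp [hv, (PySem.Set.mem_ofList L v).mpr hv]
  · have : v ∉ PySem.Set.ofList L := fun h => hv ((PySem.Set.mem_ofList L v).mp h)
    simp [hv, this]

-- ===== VERDICT (by name: the statement is the Claim_ definition above) =====
theorem summarize_backup_type_py_spec : Claim_equal_summarize_backup_type_py := by
  intro bts _
  unfold Spec_summarize_backup_type_py summarize_backup_type_py summarize_backup_type_py_alt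
  rw [pvFoldB_char]
  cases bts with
  | nil => simp
  | cons x t =>
    simp only [List.map_cons, List.isEmpty_cons, Bool.not_false, Bool.or_true, Bool.not_true,
      Bool.false_or, Bool.false_eq_true, if_false]
    rw [pvContains_ofList, pvContains_ofList]
    have hEmpty : (PySem.Set.ofList (PySem.Str.lower x :: t.map (fun s => PySem.Str.lower s))).isEmpty = false := by
      rw [List.isEmpty_eq_false_iff]
      intro h
      have hx : PySem.Str.lower x ∈
          PySem.Set.ofList (PySem.Str.lower x :: t.map (fun s => PySem.Str.lower s)) :=
        (PySem.Set.mem_ofList _ _).mpr List.mem_cons_self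
      simp [h] at hx
    rw [hEmpty]
    simp only [Bool.false_eq_true, if_false]
    split_ifs
    · rfl
    · rfl
    · rw [pvMinAcc_cons, pvSortedHead]
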